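-- pv_equiv track=rewrite | github.com/prasannavl/nix | scripts/archive/cloudflare-export.py | split_zone_map_by_group
-- ===== SOURCE A (Python) =====
-- ZONE_GROUPS = ("main", "stage", "archive", "inactive")
--
-- def split_zone_map_by_group(zone_map, zone_groups):
--     grouped = {group: {} for group in ZONE_GROUPS}
--     ungrouped = {}
--     for zone_name, value in zone_map.items():
--         group = zone_groups.get(zone_name)
--         if group in grouped:
--             grouped[group][zone_name] = value
--         else:
--             ungrouped[zone_name] = value
--     return grouped, ungrouped
-- ===== SOURCE B (Python) =====
-- ZONE_GROUPS = ("main", "stage", "archive", "inactive")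
--
-- def split_zone_map_by_group(zone_map, zone_groups):
--     known = set(ZONE_GROUPS)
--     grouped = {
--         g: {zn: v for zn, v in zone_map.items() if zone_groups.get(zn) == g}
--         for g in ZONE_GROUPS
--     }
--     ungrouped = {zn: v for zn, v in zone_map.items()
--                  if zone_groups.get(zn) not in known}
--     return grouped, ungrouped
-- ===== Notes on version B (the rewrite author's own statement) =====
-- stated objective: simpler
-- what changed: A dispatches every item through one loop over nested mutable dicts; B instead builds each group bucket with an independent filtered dict comprehension over zone_map (one per group, plus one for the ungrouped rest).
import Mathlib
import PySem

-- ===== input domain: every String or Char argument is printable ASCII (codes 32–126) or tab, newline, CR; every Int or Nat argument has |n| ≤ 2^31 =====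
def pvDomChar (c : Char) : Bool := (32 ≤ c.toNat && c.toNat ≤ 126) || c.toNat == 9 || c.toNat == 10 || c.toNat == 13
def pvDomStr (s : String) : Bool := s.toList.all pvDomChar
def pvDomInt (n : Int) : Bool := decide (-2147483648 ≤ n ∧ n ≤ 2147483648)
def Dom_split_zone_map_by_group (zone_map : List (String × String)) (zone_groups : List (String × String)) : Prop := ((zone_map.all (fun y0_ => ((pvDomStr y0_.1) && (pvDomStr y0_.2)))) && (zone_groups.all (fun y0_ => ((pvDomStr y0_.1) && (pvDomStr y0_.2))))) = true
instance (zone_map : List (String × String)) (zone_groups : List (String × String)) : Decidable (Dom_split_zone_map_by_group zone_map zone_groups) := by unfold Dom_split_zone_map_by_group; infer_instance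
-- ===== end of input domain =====

-- B replaces A's single dispatching loop over nested mutable dicts by independent filtered
-- dict comprehensions, one per group plus one for the ungrouped rest (objective: simpler).

-- the module constant ZONE_GROUPS
def pvZoneGroups : List String := ["main", "stage", "archive", "inactive"]

-- ===== PORT A =====
def split_zone_map_by_group (zone_map : List (String × String)) (zone_groups : List (String × String)) : (List (String × List (String × String))) × (List (String × String)) :=
  -- grouped = {group: {} for group in ZONE_GROUPS}
  let grouped0 : PySem.Dict String (PySem.Dict String String) :=
    pvZoneGroups.foldl (fun d g => d.insert g PySem.Dict.empty) PySem.Dict.empty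
  -- for zone_name, value in zone_map.items(): …
  let st :=
    zone_map.foldl
      (fun (st : PySem.Dict String (PySem.Dict String String) × PySem.Dict String String) p =>
        match List.lookup p.1 zone_groups with      -- group = zone_groups.get(zone_name)
        | some g =>
            if st.1.contains g then                 -- if group in grouped:
              (st.1.modify g PySem.Dict.empty (fun d => d.insert p.1 p.2), st.2)
            else
              (st.1, st.2.insert p.1 p.2)
        | none => (st.1, st.2.insert p.1 p.2))      -- None is never a key of grouped
      (grouped0, PySem.Dict.empty)
  (st.1.items.map (fun q => (q.1, q.2.items)), st.2.items)

-- ===== PORT B =====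
-- {zn: v for zn, v in pairs} = insert the filtered pairs, in order, into a fresh dict
def pvDictComp (l : List (String × String)) : PySem.Dict String String :=
  l.foldl (fun d p => d.insert p.1 p.2) PySem.Dict.empty

def split_zone_map_by_group_alt (zone_map : List (String × String)) (zone_groups : List (String × String)) : (List (String × List (String × String))) × (List (String × String)) :=
  let known : PySem.Set String := PySem.Set.ofList pvZoneGroups
  let grouped := pvZoneGroups.map (fun g =>
    (g, (pvDictComp (zone_map.filter (fun p => List.lookup p.1 zone_groups == some g))).items))
  let ungrouped := (pvDictComp (zone_map.filter (fun p =>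
      match List.lookup p.1 zone_groups with
      | some g => !(known.contains g)
      | none => true))).items
  (grouped, ungrouped)

-- ===== PRECONDITION & SPEC =====
def Spec_split_zone_map_by_group (zone_map : List (String × String)) (zone_groups : List (String × String)) (out : (List (String × List (String × String))) × (List (String × String))) : Prop := out = split_zone_map_by_group_alt zone_map zone_groups
instance (zone_map : List (String × String)) (zone_groups : List (String × String)) (out : (List (String × List (String × String))) × (List (String × String))) : Decidable (Spec_split_zone_map_by_group zone_map zone_groups out) := by unfold Spec_split_zone_map_by_group; infer_instance

-- ===== CLAIM (what is proved, stated in full; the proofs are below) =====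
def Claim_equal_split_zone_map_by_group : Prop := ∀ (zone_map : List (String × String)) (zone_groups : List (String × String)), Dom_split_zone_map_by_group zone_map zone_groups → Spec_split_zone_map_by_group zone_map zone_groups (split_zone_map_by_group zone_map zone_groups)

-- ===== LEMMAS AND PROOFS =====

-- the loop body of port A, named for the lemmas
def pvStepA (zg : List (String × String))
    (st : PySem.Dict String (PySem.Dict String String) × PySem.Dict String String)
    (p : String × String) :
    PySem.Dict String (PySem.Dict String String) × PySem.Dict String String :=
  match List.lookup p.1 zg with
  | some g =>
      if st.1.contains g then
        (st.1.modify g PySem.Dict.empty (fun d => d.insert p.1 p.2), st.2)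
      else
        (st.1, st.2.insert p.1 p.2)
  | none => (st.1, st.2.insert p.1 p.2)

-- the ungrouped filter predicate of port B
def pvUngroupedPred (zg : List (String × String)) (p : String × String) : Bool :=
  match List.lookup p.1 zg with
  | some g => !((PySem.Set.ofList pvZoneGroups).contains g)
  | none => true

lemma pvZoneGroups_nodup : pvZoneGroups.Nodup := by decide

lemma pvSet_ofList_zoneGroups : PySem.Set.ofList pvZoneGroups = pvZoneGroups := by decide

-- Loop invariant: folding pvStepA from a state whose grouped keys are exactly ZONE_GROUPS
-- distributes each element of l into the bucket of its group / into ungrouped, exactly as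
-- B's independent filtered passes do.
lemma pvFoldA_invariant (zg : List (String × String)) :
    ∀ (l : List (String × String))
      (G : PySem.Dict String (PySem.Dict String String)) (U : PySem.Dict String String),
      G.keys = pvZoneGroups →
      (l.foldl (pvStepA zg) (G, U)).1.items
          = G.items.map (fun q => (q.1,
              (l.filter (fun p => List.lookup p.1 zg == some q.1)).foldl
                (fun d p => d.insert p.1 p.2) q.2))
        ∧ (l.foldl (pvStepA zg) (G, U)).2
          = (l.filter (pvUngroupedPred zg)).foldl (fun d p => d.insert p.1 p.2) U := by
  intro l
  induction l with
  | nil => intro G U hG; constructor <;> simp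
  | cons p t ih =>
    intro G U hG
    have hnd : G.keys.Nodup := hG ▸ pvZoneGroups_nodup
    rw [List.foldl_cons]
    rcases h : List.lookup p.1 zg with _ | g
    · -- group is None: goes to ungrouped
      have hstep : pvStepA zg (G, U) p = (G, U.insert p.1 p.2) := by
        simp [pvStepA, h]
      rw [hstep]
      obtain ⟨ih1, ih2⟩ := ih G (U.insert p.1 p.2) hG
      refine ⟨?_, ?_⟩
      · rw [ih1]
        apply List.map_congr_left
        intro q _
        simp [h]
      · rw [ih2]
        simp [pvUngroupedPred, h]
    · by_cases hc : G.contains g = true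
      · -- group is a known bucket
        have hstep : pvStepA zg (G, U) p
            = (G.insert g ((G.getD g PySem.Dict.empty).insert p.1 p.2), U) := by
          simp [pvStepA, h, hc, PySem.Dict.modify]
        rw [hstep]
        have hG' : (G.insert g ((G.getD g PySem.Dict.empty).insert p.1 p.2)).keys
            = pvZoneGroups := by
          rw [PySem.Dict.keys_insert_of_contains _ _ hc, hG]
        obtain ⟨ih1, ih2⟩ := ih _ U hG'
        refine ⟨?_, ?_⟩
        · rw [ih1, PySem.Dict.items_insert_of_contains _ _ hc, List.map_map]
          apply List.map_congr_left
          intro q hq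
          by_cases hqg : q.1 = g
          · have hget : G.get? q.1 = some q.2 :=
              PySem.Dict.get?_of_mem_items G (by exact hq) hnd
            have hgetD : G.getD g PySem.Dict.empty = q.2 := by
              rw [← hqg, PySem.Dict.getD, hget]; rfl
            simp only [Function.comp_apply, hqg, beq_self_eq_true, if_true, hgetD]
            simp [h]
          · have hpred : (List.lookup p.1 zg == some q.1) = false := by
              rw [h]; simp; exact fun he => hqg he.symm
            simp [hqg, hpred]
        · rw [ih2]
          have hmem : g ∈ pvZoneGroups := hG ▸ ((PySem.Dict.contains_iff_mem_keys G g).mp hc)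
          have hpred : pvUngroupedPred zg p = false := by
            simp [pvUngroupedPred, h, pvSet_ofList_zoneGroups, hmem]
          simp [hpred]
      · -- group is an unknown string: goes to ungrouped
        have hstep : pvStepA zg (G, U) p = (G, U.insert p.1 p.2) := by
          simp [pvStepA, h, hc]
        rw [hstep]
        have hnotmem : g ∉ pvZoneGroups := by
          intro hm
          exact hc ((PySem.Dict.contains_iff_mem_keys G g).mpr (hG ▸ hm))
        obtain ⟨ih1, ih2⟩ := ih G (U.insert p.1 p.2) hG
        refine ⟨?_, ?_⟩
        · rw [ih1]
          apply List.map_congr_left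
          intro q hq
          have hqmem : q.1 ∈ pvZoneGroups := hG ▸ PySem.Dict.mem_keys_of_mem_items G hq
          have hpred : (List.lookup p.1 zg == some q.1) = false := by
            rw [h]; simp; exact fun he => hnotmem (he ▸ hqmem)
          simp [hpred]
        · rw [ih2]
          have hpred : pvUngroupedPred zg p = true := by
            simp [pvUngroupedPred, h, pvSet_ofList_zoneGroups, hnotmem]
          rw [List.filter_cons_of_pos hpred, List.foldl_cons]

theorem pv_main (zone_map zone_groups : List (String × String)) :
    split_zone_map_by_group zone_map zone_groups
      = split_zone_map_by_group_alt zone_map zone_groups := by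
  have hG0 : (pvZoneGroups.foldl (fun d g => d.insert g PySem.Dict.empty)
      (PySem.Dict.empty : PySem.Dict String (PySem.Dict String String))).items
      = pvZoneGroups.map (fun g => (g, PySem.Dict.empty)) := by rfl
  have hkeys : (pvZoneGroups.foldl (fun d g => d.insert g PySem.Dict.empty)
      (PySem.Dict.empty : PySem.Dict String (PySem.Dict String String))).keys
      = pvZoneGroups := by rfl
  obtain ⟨h1, h2⟩ := pvFoldA_invariant zone_groups zone_map _ PySem.Dict.empty hkeys
  show ((List.foldl (pvStepA zone_groups) _ zone_map).1.items.map (fun q => (q.1, q.2.items)),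
        (List.foldl (pvStepA zone_groups) _ zone_map).2.items) = _
  rw [h1, h2, hG0]
  simp only [split_zone_map_by_group_alt, pvDictComp, List.map_map]
  rfl

-- ===== VERDICT (by name: the statement is the Claim_ definition above) =====
theorem split_zone_map_by_group_spec : Claim_equal_split_zone_map_by_group := by
  intro zm zg _
  unfold Spec_split_zone_map_by_group
  exact pv_main zm zg
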